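-- pv_equiv track=rewrite | github.com/Minjuu1/prj-coRead | backend/pipeline/agent_gen.py | _build_paper_context
-- ===== SOURCE A (Python) =====
-- _INTRO_CHARS = 5000
--
-- _PRIORITY_SECTIONS = ("abstract", "introduction", "conclusion", "discussion", "summary", "implications")
--
-- _SKIP_SECTIONS = ("references", "acknowledgment", "appendix", "bibliography")
--
-- def _build_paper_context(chunks: list) -> str:
--     """
--     Abstract + Intro + Conclusion/Discussion 섹션 우선 포함.
--     총 ~5000자로 논문 전체 스코프를 대표하는 텍스트 구성.
--     """
--     priority = []
--     rest = []
--
--     for c in chunks: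
--         section = c.get("section", "").lower()
--         if any(k in section for k in _SKIP_SECTIONS):
--             continue
--         entry = (c.get("section", ""), c.get("content", ""))
--         if any(k in section for k in _PRIORITY_SECTIONS):
--             priority.append(entry)
--         else:
--             rest.append(entry)
--
--     ordered = priority + rest
--     parts = []
--     total = 0
--     for section, content in ordered:
--         parts.append(f"[{section}]\n{content}")
--         total += len(content)
--         if total >= _INTRO_CHARS:
--             break
--
--     return "\n\n".join(parts)
-- ===== SOURCE B (Python) =====
-- _INTRO_CHARS = 5000
--
-- _PRIORITY_SECTIONS = ("abstract", "introduction", "conclusion", "discussion", "summary", "implications")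
--
-- _SKIP_SECTIONS = ("references", "acknowledgment", "appendix", "bibliography")
--
--
-- def _rank(section: str) -> int:
--     return 0 if any(k in section.lower() for k in _PRIORITY_SECTIONS) else 1
--
--
-- def _emit(entries: list, total: int) -> list:
--     if not entries:
--         return []
--     section, content = entries[0]
--     part = f"[{section}]\n{content}"
--     if total + len(content) >= _INTRO_CHARS:
--         return [part]
--     return [part] + _emit(entries[1:], total + len(content))
--
--
-- def _build_paper_context(chunks: list) -> str:
--     kept = [(c.get("section", ""), c.get("content", ""))
--             for c in chunks
--             if not any(k in c.get("section", "").lower() for k in _SKIP_SECTIONS)]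
--     ordered = sorted(kept, key=lambda e: _rank(e[0]))
--     return "\n\n".join(_emit(ordered, 0))
-- ===== Notes on version B (the rewrite author's own statement) =====
-- stated objective: alternative
-- what changed: A's single pass that hand-maintains separate priority/rest accumulator lists and an imperative budget loop is replaced by a filtering comprehension, one stable sort on a 0/1 rank key that floats priority sections to the front, and a recursive emitter for the 5000-char budget.
import Mathlib
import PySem

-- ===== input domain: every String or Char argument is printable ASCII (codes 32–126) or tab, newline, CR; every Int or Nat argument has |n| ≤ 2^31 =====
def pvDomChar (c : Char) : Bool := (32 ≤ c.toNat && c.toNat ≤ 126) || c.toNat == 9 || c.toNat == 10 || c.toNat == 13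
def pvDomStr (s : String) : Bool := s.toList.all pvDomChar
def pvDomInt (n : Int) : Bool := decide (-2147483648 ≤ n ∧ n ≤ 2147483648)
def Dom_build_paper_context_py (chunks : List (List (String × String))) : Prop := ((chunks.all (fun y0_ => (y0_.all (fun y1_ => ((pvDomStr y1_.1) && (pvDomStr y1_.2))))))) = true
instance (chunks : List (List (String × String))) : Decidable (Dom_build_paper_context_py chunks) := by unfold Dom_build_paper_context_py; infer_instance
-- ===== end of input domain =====

-- B replaces A's hand-maintained priority/rest pair with a filter comprehension plus one
-- stable sort on a 0/1 rank, and a recursive emitter (objective: alternative decomposition).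


-- ===== shared helpers (module constants and c.get, identical in both Pythons) =====
def pvPriority : List String := ["abstract", "introduction", "conclusion", "discussion", "summary", "implications"]
def pvSkip : List String := ["references", "acknowledgment", "appendix", "bibliography"]
-- c.get(k, "") on the chunk dict
def pvGet (c : List (String × String)) (k : String) : String := PySem.Dict.getD (PySem.Dict.mk c) k ""
-- any(k in s for k in kws)
def pvAnyIn (kws : List String) (s : String) : Bool := kws.any (fun k => PySem.Str.isIn k s)

-- ===== PORT A =====
-- the body of A's first for-loop, building the (priority, rest) pair
def pvStepA (pr : List (String × String) × List (String × String)) (c : List (String × String)) :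
    List (String × String) × List (String × String) :=
  let sec := PySem.Str.lower (pvGet c "section")
  if pvAnyIn pvSkip sec then pr
  else
    let entry := (pvGet c "section", pvGet c "content")
    if pvAnyIn pvPriority sec then (pr.1 ++ [entry], pr.2)
    else (pr.1, pr.2 ++ [entry])

-- A's second for-loop (with its break), as structural recursion over `ordered`
def pvEmitA : List (String × String) → List String → Int → List String
  | [], parts, _ => parts
  | (sec, content) :: rest, parts, total =>
    let parts' := parts ++ ["[" ++ sec ++ "]\n" ++ content]
    let total' := total + (PySem.Str.len content : Int)
    if 5000 ≤ total' then parts' else pvEmitA rest parts' total'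

def build_paper_context_py (chunks : List (List (String × String))) : String :=
  let pr := chunks.foldl pvStepA ([], [])
  let ordered := pr.1 ++ pr.2
  PySem.Str.join "\n\n" (pvEmitA ordered [] 0)

-- ===== PORT B =====
def pvRank (sec : String) : Int :=
  if pvAnyIn pvPriority (PySem.Str.lower sec) then 0 else 1

def pvEmitB : List (String × String) → Int → List String
  | [], _ => []
  | (sec, content) :: rest, total =>
    let part := "[" ++ sec ++ "]\n" ++ content
    if 5000 ≤ total + (PySem.Str.len content : Int) then [part]
    else part :: pvEmitB rest (total + (PySem.Str.len content : Int))

def build_paper_context_py_alt (chunks : List (List (String × String))) : String :=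
  let kept := (chunks.filter (fun c => !pvAnyIn pvSkip (PySem.Str.lower (pvGet c "section")))).map
      (fun c => (pvGet c "section", pvGet c "content"))
  let ordered := PySem.List.sorted kept (fun e => pvRank e.1) false
  PySem.Str.join "\n\n" (pvEmitB ordered 0)

-- ===== PRECONDITION & SPEC =====
def Spec_build_paper_context_py (chunks : List (List (String × String))) (out : String) : Prop := out = build_paper_context_py_alt chunks
instance (chunks : List (List (String × String))) (out : String) : Decidable (Spec_build_paper_context_py chunks out) := by unfold Spec_build_paper_context_py; infer_instance

-- ===== CLAIM (what is proved, stated in full; the proofs are below) =====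
def Claim_equal_build_paper_context_py : Prop := ∀ (chunks : List (List (String × String))), Dom_build_paper_context_py chunks → Spec_build_paper_context_py chunks (build_paper_context_py chunks)

-- ===== LEMMAS AND PROOFS =====

-- inserting x in front of the first element the `before` test accepts
theorem pv_insertBy_middle {α : Type} (before : α → α → Bool) (x z : α) (p r : List α)
    (hp : ∀ y ∈ p, before x y = false) (hz : before x z = true) :
    PySem.List.insertBy before x (p ++ z :: r) = p ++ x :: z :: r := by
  induction p with
  | nil => simp [PySem.List.insertBy, hz]
  | cons a p ih =>
    have ha : before x a = false := hp a (by simp)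
    simp only [List.cons_append, PySem.List.insertBy, ha]
    simp [ih (fun y hy => hp y (by simp [hy]))]

-- a stable sort on a 0/1 rank is exactly "matching entries first, in order"
theorem pv_sorted_binary {α : Type} (xs : List α) (p : α → Bool) :
    PySem.List.sorted xs (fun x => if p x then (0 : Int) else 1) false
      = xs.filter p ++ xs.filter (fun x => !p x) := by
  rw [PySem.List.sorted_eq_foldl_insertBy]
  suffices h : ∀ (l : List α) (a b : List α), (∀ y ∈ a, p y = true) → (∀ y ∈ b, p y = false) →
      l.foldl (fun acc x => PySem.List.insertBy
        (fun u v => decide ((if p u then (0 : Int) else 1) < (if p v then (0 : Int) else 1))) x acc) (a ++ b)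
      = (a ++ l.filter p) ++ (b ++ l.filter (fun x => !p x)) by
    simpa using h xs [] [] (by simp) (by simp)
  intro l
  induction l with
  | nil => intro a b _ _; simp
  | cons x l ih =>
    intro a b ha hb
    simp only [List.foldl_cons]
    by_cases hx : p x = true
    · have ha' : ∀ y ∈ a ++ [x], p y = true := by
        intro y hy
        rcases List.mem_append.mp hy with h | h
        · exact ha y h
        · simp at h; simpa [h] using hx
      have hstep : PySem.List.insertBy
          (fun u v => decide ((if p u then (0 : Int) else 1) < (if p v then (0 : Int) else 1))) x (a ++ b)
          = (a ++ [x]) ++ b := by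
        cases b with
        | nil =>
          rw [PySem.List.insertBy_of_forall_not_before]
          · simp
          · intro y hy
            simp only [List.append_nil] at hy
            simp [hx, ha y hy]
        | cons z r =>
          rw [pv_insertBy_middle]
          · simp
          · intro y hy; simp [hx, ha y hy]
          · simp [hx, hb z (by simp)]
      rw [hstep, ih (a ++ [x]) b ha' hb]
      simp [hx]
    · have hx' : p x = false := by simpa using hx
      have hb' : ∀ y ∈ b ++ [x], p y = false := by
        intro y hy
        rcases List.mem_append.mp hy with h | h
        · exact hb y h
        · simp at h; simpa [h] using hx'
      have hstep : PySem.List.insertBy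
          (fun u v => decide ((if p u then (0 : Int) else 1) < (if p v then (0 : Int) else 1))) x (a ++ b)
          = a ++ (b ++ [x]) := by
        rw [PySem.List.insertBy_of_forall_not_before]
        · simp
        · intro y hy
          rcases List.mem_append.mp hy with h | h
          · simp [hx', ha y h]
          · simp [hx', hb y h]
      rw [hstep, ih a (b ++ [x]) ha hb']
      simp [hx']

-- A's partition loop, characterised by two filters over B's `kept` list
theorem pv_partition (chunks : List (List (String × String)))
    (a b : List (String × String)) :
    chunks.foldl pvStepA (a, b)
      = (a ++ ((chunks.filter (fun c => !pvAnyIn pvSkip (PySem.Str.lower (pvGet c "section")))).map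
            (fun c => (pvGet c "section", pvGet c "content"))).filter
            (fun e => pvAnyIn pvPriority (PySem.Str.lower e.1)),
         b ++ ((chunks.filter (fun c => !pvAnyIn pvSkip (PySem.Str.lower (pvGet c "section")))).map
            (fun c => (pvGet c "section", pvGet c "content"))).filter
            (fun e => !pvAnyIn pvPriority (PySem.Str.lower e.1))) := by
  induction chunks generalizing a b with
  | nil => simp
  | cons c chunks ih =>
    simp only [List.foldl_cons]
    by_cases hskip : pvAnyIn pvSkip (PySem.Str.lower (pvGet c "section")) = true
    · rw [show pvStepA (a, b) c = (a, b) by simp [pvStepA, hskip]]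
      rw [ih a b]
      simp [hskip]
    · have hskip' : pvAnyIn pvSkip (PySem.Str.lower (pvGet c "section")) = false := by simpa using hskip
      by_cases hpri : pvAnyIn pvPriority (PySem.Str.lower (pvGet c "section")) = true
      · rw [show pvStepA (a, b) c = (a ++ [(pvGet c "section", pvGet c "content")], b) by
            simp [pvStepA, hskip', hpri]]
        rw [ih]
        simp [hskip', hpri]
      · have hpri' : pvAnyIn pvPriority (PySem.Str.lower (pvGet c "section")) = false := by simpa using hpri
        rw [show pvStepA (a, b) c = (a, b ++ [(pvGet c "section", pvGet c "content")]) by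
            simp [pvStepA, hskip', hpri']]
        rw [ih]
        simp [hskip', hpri']

-- the accumulator loop equals the recursive emitter
theorem pv_emit_eq (es : List (String × String)) (parts : List String) (total : Int) :
    pvEmitA es parts total = parts ++ pvEmitB es total := by
  induction es generalizing parts total with
  | nil => simp [pvEmitA, pvEmitB]
  | cons e rest ih =>
    obtain ⟨s, c⟩ := e
    simp only [pvEmitA, pvEmitB, PySem.Str.len_eq]
    by_cases h : 5000 ≤ total + (c.length : Int)
    · simp [h]
    · simp [h, ih]

-- ===== VERDICT (by name: the statement is the Claim_ definition above) =====
theorem build_paper_context_py_spec : Claim_equal_build_paper_context_py := by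
  intro chunks _
  unfold Spec_build_paper_context_py
  simp only [build_paper_context_py, build_paper_context_py_alt]
  rw [pv_partition chunks [] []]
  have hkey : (fun e : String × String => pvRank e.1)
      = (fun e : String × String => if pvAnyIn pvPriority (PySem.Str.lower e.1) then (0 : Int) else 1) := rfl
  rw [hkey, pv_sorted_binary (α := String × String) _ (fun e => pvAnyIn pvPriority (PySem.Str.lower e.1))]
  simp [pv_emit_eq]
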